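-- pv_equiv track=rewrite | github.com/matirowensztein/fundamentos-programacion | Cadenas.py | devolver_texto
-- ===== SOURCE A (Python) =====
-- def devolver_texto(cadena):
--     nueva_cadena = ""
--
--     siguiente_mayuscula = False
--
--     for letra in cadena:
--         if siguiente_mayuscula:
--             nueva_cadena += letra.upper()
--             siguiente_mayuscula = False
--         else:
--             if letra == ".":
--                 siguiente_mayuscula = True
--
--             nueva_cadena += letra.lower()
--
--     return nueva_cadena
-- ===== SOURCE B (Python) =====
-- def devolver_texto(cadena):
--     # Lowercase the whole string once, then rebuild it consuming two
--     # characters at each period (the period and the letter it capitalizes).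
--     s = cadena.lower()
--     partes = []
--     i = 0
--     n = len(s)
--     while i < n:
--         if s[i] == "." and i + 1 < n:
--             partes.append("." + s[i + 1].upper())
--             i += 2
--         else:
--             partes.append(s[i])
--             i += 1
--     return "".join(partes)
-- ===== Notes on version B (the rewrite author's own statement) =====
-- stated objective: alternative
-- what changed: Replaces A's character-by-character loop carrying a boolean flag with a stateless pass over the pre-lowercased string that consumes each period together with its following character, collecting pieces in a list joined once.
import Mathlib
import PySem

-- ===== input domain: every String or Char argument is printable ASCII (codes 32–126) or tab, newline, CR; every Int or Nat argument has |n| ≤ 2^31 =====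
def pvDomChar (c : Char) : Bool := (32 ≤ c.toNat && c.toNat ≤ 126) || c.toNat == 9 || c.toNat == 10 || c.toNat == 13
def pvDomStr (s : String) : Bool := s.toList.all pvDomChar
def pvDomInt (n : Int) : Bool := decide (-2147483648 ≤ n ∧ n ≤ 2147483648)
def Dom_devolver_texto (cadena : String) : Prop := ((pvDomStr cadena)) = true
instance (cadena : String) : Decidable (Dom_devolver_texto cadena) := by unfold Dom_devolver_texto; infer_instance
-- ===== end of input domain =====

-- B replaces A's flag-carrying concatenation loop by one pass over the pre-lowercased
-- string that consumes each period together with the character it capitalizes (objective: alternative).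

-- ===== PORT A =====
-- the for-loop of A: state = (nueva_cadena as List Char, siguiente_mayuscula)
def devolverGo : List Char → List Char → Bool → List Char
  | [], nueva, _ => nueva
  | letra :: rest, nueva, sig =>
    if sig then
      devolverGo rest (nueva ++ [PySem.Chars.upperChar letra]) false
    else if letra == '.' then
      devolverGo rest (nueva ++ [PySem.Chars.lowerChar letra]) true
    else
      devolverGo rest (nueva ++ [PySem.Chars.lowerChar letra]) false

def devolver_texto (cadena : String) : String :=
  String.mk (devolverGo cadena.toList [] false)

-- ===== PORT B =====
-- Source B's while-loop: at a period with a successor consume two characters, else one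
def altGo : List Char → List Char
  | [] => []
  | '.' :: c :: rest => '.' :: PySem.Chars.upperChar c :: altGo rest
  | c :: rest => c :: altGo rest

def devolver_texto_alt (cadena : String) : String :=
  String.mk (altGo (PySem.Chars.lower cadena.toList))

-- ===== PRECONDITION & SPEC =====
def Spec_devolver_texto (cadena : String) (out : String) : Prop := out = devolver_texto_alt cadena
instance (cadena : String) (out : String) : Decidable (Spec_devolver_texto cadena out) := by unfold Spec_devolver_texto; infer_instance

-- ===== CLAIM (what is proved, stated in full; the proofs are below) =====
def Claim_equal_devolver_texto : Prop := ∀ (cadena : String), Dom_devolver_texto cadena → Spec_devolver_texto cadena (devolver_texto cadena)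

-- ===== LEMMAS AND PROOFS =====
theorem pvOfNatToNat (n : Nat) (h : n.isValidChar) : (Char.ofNat n).toNat = n := by
  unfold Char.ofNat
  rw [dif_pos h]
  simp [Char.ofNatAux, Char.toNat]

theorem pvUpperLower (c : Char) :
    PySem.Chars.upperChar (PySem.Chars.lowerChar c) = PySem.Chars.upperChar c := by
  by_cases h : PySem.Chars.isupper c = true
  · have hb : 65 ≤ c.toNat ∧ c.toNat ≤ 90 := by
      simp only [PySem.Chars.isupper, Bool.and_eq_true, decide_eq_true_eq, Char.le_def] at h
      exact ⟨h.1, h.2⟩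
    have hval : (c.toNat + 32).isValidChar := Or.inl (by omega)
    have htn : (Char.ofNat (c.toNat + 32)).toNat = c.toNat + 32 := pvOfNatToNat _ hval
    have hlow : PySem.Chars.islower (Char.ofNat (c.toNat + 32)) = true := by
      simp only [PySem.Chars.islower, Bool.and_eq_true, decide_eq_true_eq, Char.le_def]
      refine ⟨?_, ?_⟩
      · rw [UInt32.le_iff_toNat_le]
        show 97 ≤ (Char.ofNat (c.toNat + 32)).toNat
        omega
      · rw [UInt32.le_iff_toNat_le]
        show (Char.ofNat (c.toNat + 32)).toNat ≤ 122
        omega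
    have hnotlow : PySem.Chars.islower c = false := by
      simp only [PySem.Chars.islower, Char.le_def, Bool.and_eq_false_iff, decide_eq_false_iff_not]
      left
      intro hc
      rw [UInt32.le_iff_toNat_le] at hc
      have h97 : (97:Nat) ≤ c.toNat := hc
      omega
    simp only [PySem.Chars.lowerChar, PySem.Chars.upperChar, h, hlow, hnotlow,
      Bool.false_eq_true, if_false, if_true]
    rw [htn]
    simp only [Nat.add_sub_cancel, Char.ofNat_toNat]
  · have h' : PySem.Chars.isupper c = false := by simpa using h
    simp [PySem.Chars.lowerChar, h']

theorem pvLowerCharNeDot (c : Char) (h : c ≠ '.') : PySem.Chars.lowerChar c ≠ '.' := by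
  by_cases hu : PySem.Chars.isupper c = true
  · have hb : 65 ≤ c.toNat := by
      simp only [PySem.Chars.isupper, Bool.and_eq_true, decide_eq_true_eq, Char.le_def] at hu
      exact hu.1
    have hval : (c.toNat + 32).isValidChar := by
      left
      have hz : c.toNat ≤ 90 := by
        simp only [PySem.Chars.isupper, Bool.and_eq_true, decide_eq_true_eq, Char.le_def] at hu
        exact hu.2
      omega
    have htn : (Char.ofNat (c.toNat + 32)).toNat = c.toNat + 32 := pvOfNatToNat _ hval
    simp only [PySem.Chars.lowerChar, hu, if_true]
    intro he
    have : (Char.ofNat (c.toNat + 32)).toNat = ('.').toNat := by rw [he]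
    rw [htn] at this
    have : c.toNat + 32 = 46 := this
    omega
  · have h' : PySem.Chars.isupper c = false := by simpa using hu
    simpa [PySem.Chars.lowerChar, h'] using h

theorem pvLowerDot : PySem.Chars.lowerChar '.' = '.' := by decide

theorem altGo_dot (c : Char) (l : List Char) :
    altGo ('.' :: c :: l) = '.' :: PySem.Chars.upperChar c :: altGo l := rfl

theorem altGo_cons_ne (c : Char) (h : c ≠ '.') (l : List Char) :
    altGo (c :: l) = c :: altGo l := by
  cases l with
  | nil => simp [altGo]
  | cons d r =>
    conv_lhs => rw [altGo.eq_def]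
    simp [h]

theorem devolverGo_eq_altGo : ∀ l : List Char,
    (∀ acc, devolverGo l acc false = acc ++ altGo (List.map PySem.Chars.lowerChar l)) ∧
    (∀ acc, devolverGo l acc true =
      acc ++ match l with
             | [] => []
             | c :: r => PySem.Chars.upperChar c :: altGo (List.map PySem.Chars.lowerChar r)) := by
  intro l
  induction l with
  | nil => simp [devolverGo, altGo]
  | cons c r ih =>
    constructor
    · intro acc
      by_cases hc : c = '.'
      · subst hc
        have hstep : devolverGo ('.' :: r) acc false = devolverGo r (acc ++ ['.']) true := by
          simp [devolverGo, pvLowerDot]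
        rw [hstep, ih.2]
        cases r with
        | nil => simp [altGo, pvLowerDot]
        | cons d r2 =>
          simp only [List.map, pvLowerDot, altGo_dot, pvUpperLower, List.append_assoc,
            List.cons_append, List.nil_append]
      · have hstep : devolverGo (c :: r) acc false =
            devolverGo r (acc ++ [PySem.Chars.lowerChar c]) false := by
          simp [devolverGo, hc]
        rw [hstep, ih.1, List.map, altGo_cons_ne _ (pvLowerCharNeDot c hc)]
        simp
    · intro acc
      have hstep : devolverGo (c :: r) acc true =
          devolverGo r (acc ++ [PySem.Chars.upperChar c]) false := by
        simp [devolverGo]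
      rw [hstep, ih.1]
      simp

-- ===== VERDICT (by name: the statement is the Claim_ definition above) =====
theorem devolver_texto_spec : Claim_equal_devolver_texto := by
  intro cadena _
  unfold Spec_devolver_texto devolver_texto devolver_texto_alt PySem.Chars.lower
  exact congrArg String.mk (by simpa using (devolverGo_eq_altGo cadena.toList).1 [])
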